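-- pv_equiv track=rewrite | github.com/hengbingao/scFv_Pmpnn_AF2 | scripts/find_loops.py | fill_gaps_and_remove_isolated_residues
-- ===== SOURCE A (Python) =====
-- def fill_gaps_and_remove_isolated_residues(residues):
--     # Start with the original list of residues in contact
--     filled_residues = sorted(set(residues))
--
--     # Initialize a list to hold the intermediate set of residues, including gap-filled ones
--     intermediate_residues = []
--
--     # Go through the sorted list and fill in the gaps
--     i = 0
--     while i < len(filled_residues) - 1:
--         intermediate_residues.append(filled_residues[i])
--
--         # Check the gap between the current and next residue
--         gap = filled_residues[i + 1] - filled_residues[i]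
--
--         # If the gap is 2 or 3 (indicating 1 or 2 residues missing between them), fill it
--         if gap <= 3:
--             # Add the missing residues to the intermediate list
--             intermediate_residues.extend(range(filled_residues[i] + 1, filled_residues[i + 1]))
--
--         i += 1
--
--     # Add the last residue since it's not covered in the loop
--     intermediate_residues.append(filled_residues[-1])
--
--     # Remove isolated residues
--     final_residues = []
--     for res in intermediate_residues:
--         # Check if the residue has neighbors within 5 residue numbers
--         has_neighbors = any(abs(res - other) <= 5 for other in intermediate_residues if other != res)
--         if has_neighbors:
--             final_residues.append(res)
--
--     return sorted(final_residues)
-- ===== SOURCE B (Python) =====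
-- def fill_gaps_and_remove_isolated_residues(residues):
--     # Faster exact rewrite: one adjacent-pair scan of the sorted unique list builds the
--     # gap-filled list; isolation is decided by adjacent neighbors only (the list is
--     # strictly increasing), so the quadratic all-pairs scan disappears.
--     if not residues:
--         return []
--     xs = sorted(set(residues))
--     inter = []
--     for a, b in zip(xs, xs[1:]):
--         if b - a <= 3:
--             inter.extend(range(a, b))   # a plus the filled gap
--         else:
--             inter.append(a)
--     inter.append(xs[-1])
--     out = []
--     prev = None
--     n = len(inter)
--     for j in range(n):
--         r = inter[j]
--         if (prev is not None and r - prev <= 5) or (j + 1 < n and inter[j + 1] - r <= 5):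
--             out.append(r)
--         prev = r
--     return out
-- ===== Notes on version B (the rewrite author's own statement) =====
-- stated objective: faster
-- what changed: A's quadratic all-pairs 'any' scan to detect isolated residues (plus a final re-sort) is replaced by a single pass over the gap-filled list that checks only the two adjacent neighbors (the list is strictly increasing, so the nearest element is an adjacent one), and the gap filling iterates over adjacent pairs instead of indices.
import Mathlib
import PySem

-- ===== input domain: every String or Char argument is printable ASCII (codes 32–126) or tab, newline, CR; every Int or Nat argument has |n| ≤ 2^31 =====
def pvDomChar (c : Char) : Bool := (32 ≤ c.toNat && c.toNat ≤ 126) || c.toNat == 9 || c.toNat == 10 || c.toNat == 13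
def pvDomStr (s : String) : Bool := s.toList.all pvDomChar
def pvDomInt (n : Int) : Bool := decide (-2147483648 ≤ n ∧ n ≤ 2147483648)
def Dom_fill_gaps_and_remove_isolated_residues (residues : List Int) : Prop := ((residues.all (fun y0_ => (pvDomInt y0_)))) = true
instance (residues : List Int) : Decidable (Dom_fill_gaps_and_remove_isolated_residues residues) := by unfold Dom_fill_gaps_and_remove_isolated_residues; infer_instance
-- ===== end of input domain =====

-- B replaces A's quadratic all-pairs isolation scan by a single adjacent-neighbor pass
-- over the (strictly increasing) gap-filled list; objective: faster.


-- ===== PORT A =====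
-- A's while loop over the int counter i (always ≥ 0, so kept as a Nat; filled[i] with
-- 0 ≤ i < len is List.getD), carrying the intermediate list as its state.
def pvLoopA (filled : List Int) (i : Nat) (inter : List Int) : List Int :=
  if _h : i < filled.length - 1 then
    let cur := filled.getD i 0
    let nxt := filled.getD (i + 1) 0
    let inter1 := inter ++ [cur]
    let inter2 := if nxt - cur ≤ 3 then inter1 ++ PySem.List.pyRange (cur + 1) nxt 1 else inter1
    pvLoopA filled (i + 1) inter2
  else inter
termination_by filled.length - 1 - i

def fill_gaps_and_remove_isolated_residues (residues : List Int) : List Int :=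
  let filled := PySem.List.sorted (PySem.Set.ofList residues) (fun x => x) false
  let loopRes := pvLoopA filled 0 []
  match PySem.List.pyGet? filled (-1) with
  | none => []   -- filled_residues[-1] raises IndexError here (empty input); excluded by Pre_
  | some last =>
    let inter := loopRes ++ [last]
    let final := inter.foldl (fun acc res =>
      if inter.any (fun other => decide (other ≠ res) && decide (|res - other| ≤ 5)) then
        acc ++ [res]
      else acc) []
    PySem.List.sorted final (fun x => x) false

-- ===== PORT B =====
-- the zip(xs, xs[1:]) gap-filling pass plus the final xs[-1] append, structurally
def pvInterB : List Int → List Int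
  | [] => []
  | [x] => [x]
  | a :: b :: t =>
      (if b - a ≤ 3 then PySem.List.pyRange a b 1 else [a]) ++ pvInterB (b :: t)

-- the adjacent-neighbor filter pass, carrying prev through the list
def pvFilterB (prev : Option Int) : List Int → List Int
  | [] => []
  | r :: rest =>
      let keepPrev := match prev with | some p => decide (r - p ≤ 5) | none => false
      let keepNext := match rest with | s :: _ => decide (s - r ≤ 5) | _ => false
      (if keepPrev || keepNext then [r] else []) ++ pvFilterB (some r) rest

def fill_gaps_and_remove_isolated_residues_alt (residues : List Int) : List Int :=
  if residues = [] then []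
  else
    let xs := PySem.List.sorted (PySem.Set.ofList residues) (fun x => x) false
    pvFilterB none (pvInterB xs)

-- ===== PRECONDITION & SPEC =====
-- Pre_ excludes only the empty list, on which Python A raises IndexError (filled_residues[-1]).
def Pre_fill_gaps_and_remove_isolated_residues (residues : List Int) : Prop := residues ≠ []
instance (residues : List Int) : Decidable (Pre_fill_gaps_and_remove_isolated_residues residues) := by unfold Pre_fill_gaps_and_remove_isolated_residues; infer_instance

def pvWitness_fill_gaps_and_remove_isolated_residues : List Int := [3, 1, 9]

def Spec_fill_gaps_and_remove_isolated_residues (residues : List Int) (out : List Int) : Prop := out = fill_gaps_and_remove_isolated_residues_alt residues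
instance (residues : List Int) (out : List Int) : Decidable (Spec_fill_gaps_and_remove_isolated_residues residues out) := by unfold Spec_fill_gaps_and_remove_isolated_residues; infer_instance

-- ===== CLAIM (what is proved, stated in full; the proofs are below) =====
def Claim_equal_fill_gaps_and_remove_isolated_residues : Prop := ∀ (residues : List Int), Dom_fill_gaps_and_remove_isolated_residues residues → Pre_fill_gaps_and_remove_isolated_residues residues → Spec_fill_gaps_and_remove_isolated_residues residues (fill_gaps_and_remove_isolated_residues residues)

-- ===== LEMMAS AND PROOFS =====

-- reference form of the gap-filled list (structural recursion on the sorted list)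
def pvSpecInter : List Int → List Int
  | [] => []
  | [x] => [x]
  | a :: b :: t =>
      (a :: (if b - a ≤ 3 then PySem.List.pyRange (a + 1) b 1 else [])) ++ pvSpecInter (b :: t)

-- the neighbor test A applies to each residue
def pvPred (l : List Int) (r : Int) : Bool :=
  l.any (fun other => decide (other ≠ r) && decide (|r - other| ≤ 5))


theorem pvLoopA_acc (filled : List Int) : ∀ (d i : Nat), filled.length - 1 - i ≤ d →
    ∀ acc, pvLoopA filled i acc = acc ++ pvLoopA filled i [] := by
  intro d
  induction d with
  | zero =>
    intro i hd acc
    have hni : ¬ i < filled.length - 1 := by omega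
    conv_lhs => rw [pvLoopA]
    conv_rhs => rw [pvLoopA]
    simp [hni]
  | succ d ih =>
    intro i hd acc
    by_cases hi : i < filled.length - 1
    · conv_lhs => rw [pvLoopA]
      conv_rhs => rw [pvLoopA]
      simp only [dif_pos hi]
      conv_lhs => rw [ih (i + 1) (by omega)]
      conv_rhs => rw [ih (i + 1) (by omega)]
      split_ifs <;> simp
    · conv_lhs => rw [pvLoopA]
      conv_rhs => rw [pvLoopA]
      simp [hi]

theorem pvLoopA_shift (a : Int) (l : List Int) : ∀ (d i : Nat), l.length - i ≤ d →
    ∀ acc, pvLoopA (a :: l) (i + 1) acc = pvLoopA l i acc := by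
  intro d
  induction d with
  | zero =>
    intro i hd acc
    have h1 : ¬ i + 1 < (a :: l).length - 1 := by simp; omega
    have h2 : ¬ i < l.length - 1 := by omega
    conv_lhs => rw [pvLoopA]
    conv_rhs => rw [pvLoopA]
    simp [h2]
    intro hlt
    exact absurd hlt (by omega)
  | succ d ih =>
    intro i hd acc
    by_cases hi : i < l.length - 1
    · have h1 : i + 1 < (a :: l).length - 1 := by simp; omega
      conv_lhs => rw [pvLoopA]
      conv_rhs => rw [pvLoopA]
      simp only [dif_pos hi, dif_pos h1, List.getD_cons_succ]
      exact ih (i + 1) (by omega) _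
    · have h1 : ¬ i + 1 < (a :: l).length - 1 := by simp; omega
      conv_lhs => rw [pvLoopA]
      conv_rhs => rw [pvLoopA]
      simp [hi]
      intro hlt
      exact absurd hlt (by omega)

theorem pvLoopA_specInter : ∀ (filled : List Int) (h : filled ≠ []),
    pvLoopA filled 0 [] ++ [filled.getLast h] = pvSpecInter filled := by
  intro filled
  induction filled with
  | nil => intro h; exact absurd rfl h
  | cons a t ih =>
    intro h
    match t, ih with
    | [], _ =>
      rw [pvLoopA]; simp [pvSpecInter]
    | b :: t', ih =>
      rw [pvLoopA]
      have hc : 0 < (a :: b :: t').length - 1 := by simp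
      simp only [dif_pos hc, List.getD_cons_zero, List.getD_cons_succ]
      rw [pvLoopA_acc (a :: b :: t') ((a :: b :: t').length) 1 (by omega),
          pvLoopA_shift a (b :: t') ((b :: t').length) 0 (by omega)]
      rw [List.getLast_cons (by simp)]
      rw [List.append_assoc, ih (by simp)]
      simp only [pvSpecInter]
      split_ifs <;> simp

theorem pvInterB_specInter : ∀ (filled : List Int), filled.Pairwise (· < ·) →
    pvInterB filled = pvSpecInter filled := by
  intro filled
  induction filled with
  | nil => intro _; rfl
  | cons a t ih =>
    intro h
    match t, ih with
    | [], _ => rfl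
    | b :: t', ih =>
      have hab : a < b := (List.pairwise_cons.mp h).1 b (by simp)
      simp only [pvInterB, pvSpecInter]
      rw [ih h.of_cons]
      split_ifs with hg
      · rw [PySem.List.pyRange_one_cons hab]
      · rfl

theorem pvSpecInter_head_le : ∀ (b : Int) (t : List Int), (b :: t).Pairwise (· < ·) →
    ∀ x ∈ pvSpecInter (b :: t), b ≤ x := by
  intro b t
  induction t generalizing b with
  | nil => intro _ x hx; simp [pvSpecInter] at hx; omega
  | cons c t' ih =>
    intro h x hx
    have hbc : b < c := (List.pairwise_cons.mp h).1 c (by simp)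
    simp only [pvSpecInter, List.mem_append, List.mem_cons] at hx
    rcases hx with (rfl | hx) | hx
    · exact le_rfl
    · split_ifs at hx with hg
      · have := PySem.List.mem_pyRange_one.mp hx; omega
      · simp at hx
    · have := ih c h.of_cons x hx; omega

theorem pvSpecInter_pairwise : ∀ (filled : List Int), filled.Pairwise (· < ·) →
    (pvSpecInter filled).Pairwise (· < ·) := by
  intro filled
  induction filled with
  | nil => intro _; exact List.Pairwise.nil
  | cons a t ih =>
    intro h
    match t, ih with
    | [], _ => simp [pvSpecInter]
    | b :: t', ih =>
      have hab : a < b := (List.pairwise_cons.mp h).1 b (by simp)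
      simp only [pvSpecInter]
      rw [List.pairwise_append]
      refine ⟨?_, ih h.of_cons, ?_⟩
      · rw [List.pairwise_cons]
        constructor
        · intro x hx
          split_ifs at hx with hg
          · have := PySem.List.mem_pyRange_one.mp hx; omega
          · simp at hx
        · split_ifs with hg
          · exact PySem.List.pairwise_lt_pyRange_one _ _
          · exact List.Pairwise.nil
      · intro x hx y hy
        have hby : b ≤ y := pvSpecInter_head_le b t' h.of_cons y hy
        simp only [List.mem_cons] at hx
        rcases hx with rfl | hx
        · omega
        · split_ifs at hx with hg
          · have := PySem.List.mem_pyRange_one.mp hx; omega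
          · simp at hx

-- the adjacent-neighbor test B computes (same stuck-match shape as pvFilterB's lets)
def pvKeep (prev : Option Int) (r : Int) (rest : List Int) : Bool :=
  (match prev with | some p => decide (r - p ≤ 5) | none => false) ||
  (match rest with | s :: _ => decide (s - r ≤ 5) | _ => false)

theorem pvPred_adjacent (init rest : List Int) (r : Int)
    (h : (init ++ r :: rest).Pairwise (· < ·)) :
    pvPred (init ++ r :: rest) r = pvKeep init.getLast? r rest := by
  obtain ⟨hinit, hcons, hcross⟩ := List.pairwise_append.mp h
  obtain ⟨hrlt, hrest⟩ := List.pairwise_cons.mp hcons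
  rw [Bool.eq_iff_iff]
  simp only [pvPred, pvKeep, List.any_eq_true, List.mem_append, List.mem_cons,
    Bool.and_eq_true, decide_eq_true_eq, Bool.or_eq_true]
  constructor
  · rintro ⟨x, (hx | rfl | hx), hne, habs⟩
    · left
      rw [abs_sub_le_iff] at habs
      rcases List.eq_nil_or_concat init with rfl | ⟨l', p, rfl⟩
      · simp at hx
      · rw [List.concat_eq_append] at hx hinit hcross ⊢
        rw [List.getLast?_concat]
        have hxp : x ≤ p := by
          rcases List.mem_append.mp hx with hx' | hx'
          · exact le_of_lt ((List.pairwise_append.mp hinit).2.2 x hx' p (by simp))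
          · simp at hx'; omega
        have hxr : x < r := hcross x hx r (by simp)
        simp only [decide_eq_true_eq]
        omega
    · exact absurd rfl hne
    · right
      rw [abs_sub_le_iff] at habs
      cases rest with
      | nil => simp at hx
      | cons s t =>
        have hsx : s ≤ x := by
          rcases List.mem_cons.mp hx with rfl | hx'
          · exact le_rfl
          · exact le_of_lt ((List.pairwise_cons.mp hrest).1 x hx')
        have hrx : r < x := hrlt x hx
        simp only [decide_eq_true_eq]
        omega
  · rintro (hp | hs)
    · rcases List.eq_nil_or_concat init with rfl | ⟨l', p, rfl⟩
      · simp at hp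
      · rw [List.concat_eq_append] at hp hcross ⊢
        rw [List.getLast?_concat] at hp
        simp only [decide_eq_true_eq] at hp
        have hpmem : p ∈ l' ++ [p] := by simp
        have hpr : p < r := hcross p hpmem r (by simp)
        exact ⟨p, Or.inl hpmem, by omega, by rw [abs_sub_le_iff]; omega⟩
    · cases rest with
      | nil => simp at hs
      | cons s t =>
        simp only [decide_eq_true_eq] at hs
        have hrs : r < s := hrlt s (by simp)
        exact ⟨s, Or.inr (Or.inr (by simp)), by omega, by rw [abs_sub_le_iff]; omega⟩

theorem pvFilterB_filter : ∀ (tail init : List Int), (init ++ tail).Pairwise (· < ·) →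
    pvFilterB init.getLast? tail = tail.filter (pvPred (init ++ tail)) := by
  intro tail
  induction tail with
  | nil => intro init h; simp [pvFilterB]
  | cons r rest ih =>
    intro init h
    have hih := ih (init ++ [r]) (by simpa using h)
    rw [List.getLast?_concat] at hih
    simp only [List.append_assoc, List.cons_append, List.nil_append] at hih
    have hunf : pvFilterB init.getLast? (r :: rest) =
        (if pvKeep init.getLast? r rest then [r] else []) ++ pvFilterB (some r) rest := rfl
    rw [hunf, hih, List.filter_cons, pvPred_adjacent init rest r h]
    cases hk : pvKeep init.getLast? r rest <;> simp

-- ===== VERDICT (by name: the statement is the Claim_ definition above) =====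
theorem fill_gaps_and_remove_isolated_residues_spec : Claim_equal_fill_gaps_and_remove_isolated_residues := by
  intro residues _hdom hpre
  unfold Spec_fill_gaps_and_remove_isolated_residues
  have hpre' : residues ≠ [] := hpre
  simp only [fill_gaps_and_remove_isolated_residues, fill_gaps_and_remove_isolated_residues_alt,
    if_neg hpre']
  set filled := PySem.List.sorted (PySem.Set.ofList residues) (fun x => x) false with hf
  have hne : filled ≠ [] := by
    intro hnil
    have hof : PySem.Set.ofList residues = [] := (PySem.List.sorted_eq_nil_iff _ _ _).mp hnil
    obtain ⟨x, hx⟩ := List.exists_mem_of_ne_nil residues hpre'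
    have hx' : x ∈ PySem.Set.ofList residues := (PySem.Set.mem_ofList _ _).mpr hx
    rw [hof] at hx'
    simp at hx'
  have hsp : filled.Pairwise (· < ·) := PySem.List.sorted_ofList_pairwise_lt residues
  have hspec : (pvSpecInter filled).Pairwise (· < ·) := pvSpecInter_pairwise filled hsp
  rw [PySem.List.pyGet?_neg_one, List.getLast?_eq_some_getLast hne]
  simp only []
  rw [pvLoopA_specInter filled hne]
  rw [pvInterB_specInter filled hsp]
  -- the A-side foldl is the filter by pvPred
  have hfold : (List.foldl
        (fun acc res =>
          if ((pvSpecInter filled).any fun other => decide (other ≠ res) && decide (|res - other| ≤ 5)) = true then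
            acc ++ [res]
          else acc)
        [] (pvSpecInter filled))
      = List.foldl (fun acc res => if pvPred (pvSpecInter filled) res = true then acc ++ [id res] else acc)
        [] (pvSpecInter filled) := rfl
  rw [hfold, PySem.List.foldl_append_if
        (fun res => pvPred (pvSpecInter filled) res) id (pvSpecInter filled) []]
  -- the B-side pass is the same filter
  have hB : pvFilterB none (pvSpecInter filled)
      = (pvSpecInter filled).filter (pvPred (pvSpecInter filled)) := by
    have := pvFilterB_filter (pvSpecInter filled) [] (by simpa using hspec)
    simpa using this
  rw [hB]
  simp only [List.nil_append, List.map_id]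
  exact PySem.List.sorted_eq_of_perm_of_pairwise_lt _ _ _ (List.Perm.refl _)
    (List.Pairwise.filter _ hspec)
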